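-- pv_equiv track=rewrite | github.com/anvarzokirovich/amaliyot | So'z topish o'yini/yoshirinsoz.py | yoshirin
-- ===== SOURCE A (Python) =====
-- def yoshirin(b_soz, k_soz=None):
--     qiymat=''
--     sozlar=[]
--     if k_soz!=None:
--         for i in k_soz:
--             sozlar.append(i)
--         for i in b_soz:
--             if i in sozlar:
--                 qiymat+=i
--                 sozlar.remove(i)
--             else:
--                 qiymat+='*'
--     else:
--         for i in range(len(b_soz)):
--             qiymat+='*'
--
--
--     return qiymat
-- ===== SOURCE B (Python) =====
-- def yoshirin(b_soz, k_soz=None):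
--     if k_soz is None:
--         return '*' * len(b_soz)
--     pos = {}
--     for idx, ch in enumerate(b_soz):
--         pos.setdefault(ch, []).append(idx)
--     cnt = {}
--     for ch in k_soz:
--         cnt[ch] = cnt.get(ch, 0) + 1
--     res = ['*'] * len(b_soz)
--     for ch, positions in pos.items():
--         for idx in positions[:cnt.get(ch, 0)]:
--             res[idx] = ch
--     return ''.join(res)
-- ===== Notes on version B (the rewrite author's own statement) =====
-- stated objective: faster
-- what changed: Instead of scanning a maintained multiset of unused key letters for every position (membership test + first-occurrence removal per character), B builds in one pass a dict char->positions and a counter of k_soz, then per distinct character overwrites the first count_c recorded positions in a star-filled result list.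
import Mathlib
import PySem

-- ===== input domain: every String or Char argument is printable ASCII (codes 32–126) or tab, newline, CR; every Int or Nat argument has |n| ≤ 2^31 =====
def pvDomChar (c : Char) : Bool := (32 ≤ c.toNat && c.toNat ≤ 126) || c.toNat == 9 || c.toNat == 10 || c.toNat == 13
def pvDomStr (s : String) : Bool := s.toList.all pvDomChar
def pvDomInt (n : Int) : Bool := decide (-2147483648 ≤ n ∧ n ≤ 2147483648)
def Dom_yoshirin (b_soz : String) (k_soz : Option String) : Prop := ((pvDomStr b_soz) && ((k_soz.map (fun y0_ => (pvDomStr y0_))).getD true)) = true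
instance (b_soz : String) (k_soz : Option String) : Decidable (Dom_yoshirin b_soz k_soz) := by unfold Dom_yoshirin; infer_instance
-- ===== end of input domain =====

-- B replaces A's per-position scan of a maintained multiset of unused key letters by a
-- positions-index dict plus a counter, revealing per character its first count_c occurrences.

-- ===== PORT A =====
-- the main loop over b_soz: state = (sozlar, qiymat) (qiymat as List Char, joined at the end)
def yoshirinA_loop : List Char → List Char → List Char → List Char
  | [], _, q => q
  | i :: rest, soz, q =>
    if i ∈ soz then yoshirinA_loop rest ((PySem.List.remove? soz i).getD soz) (q ++ [i])
    else yoshirinA_loop rest soz (q ++ ['*'])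

def yoshirin (b_soz : String) (k_soz : Option String) : String :=
  match k_soz with
  | some ks =>
      -- for i in k_soz: sozlar.append(i)
      let sozlar := ks.toList.foldl (fun acc i => acc ++ [i]) []
      String.mk (yoshirinA_loop b_soz.toList sozlar [])
  | none =>
      -- for i in range(len(b_soz)): qiymat += '*'
      String.mk ((PySem.List.pyRange 0 (PySem.List.len b_soz.toList) 1).foldl
        (fun q _ => q ++ ['*']) [])

-- ===== PORT B =====
def yoshirin_alt (b_soz : String) (k_soz : Option String) : String :=
  match k_soz with
  | none => String.mk (List.replicate b_soz.toList.length '*')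
  | some ks =>
      let bl := b_soz.toList
      -- pos.setdefault(ch, []).append(idx) over enumerate(b_soz)
      let pos : PySem.Dict Char (List Int) :=
        (PySem.List.enumerate bl 0).foldl
          (fun d p => d.modify p.2 [] (fun v => v ++ [p.1])) PySem.Dict.empty
      -- cnt[ch] = cnt.get(ch, 0) + 1 over k_soz
      let cnt : PySem.Dict Char Int :=
        ks.toList.foldl (fun d c => d.insert c (d.getD c 0 + 1)) PySem.Dict.empty
      -- res = ['*']*len; for ch, positions in pos.items(): for idx in positions[:cnt.get(ch,0)]: res[idx] = ch
      let res := pos.items.foldl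
        (fun r p =>
          (PySem.List.slice p.2 none (some (cnt.getD p.1 0))).foldl
            (fun r idx => PySem.List.pySetD r idx p.1) r)
        (List.replicate bl.length '*')
      String.mk res

-- ===== PRECONDITION & SPEC =====
def Spec_yoshirin (b_soz : String) (k_soz : Option String) (out : String) : Prop := out = yoshirin_alt b_soz k_soz
instance (b_soz : String) (k_soz : Option String) (out : String) : Decidable (Spec_yoshirin b_soz k_soz out) := by unfold Spec_yoshirin; infer_instance

-- ===== CLAIM (what is proved, stated in full; the proofs are below) =====
def Claim_equal_yoshirin : Prop := ∀ (b_soz : String) (k_soz : Option String), Dom_yoshirin b_soz k_soz → Spec_yoshirin b_soz k_soz (yoshirin b_soz k_soz)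

-- ===== LEMMAS AND PROOFS =====

-- the common abstract value: reveal b[j] iff the number of earlier equal letters is < its remaining budget
def maskGo : List Char → (Char → Nat) → List Char
  | [], _ => []
  | a :: t, f =>
    if 0 < f a then a :: maskGo t (fun c => if c = a then f c - 1 else f c)
    else '*' :: maskGo t f

theorem maskGo_length (l : List Char) (f : Char → Nat) : (maskGo l f).length = l.length := by
  induction l generalizing f with
  | nil => rfl
  | cons a t ih => simp only [maskGo]; split <;> simp [ih]

theorem maskGo_getElem? (l : List Char) (f : Char → Nat) (j : Nat) (h : j < l.length) :
    (maskGo l f)[j]? =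
      some (if (l.take j).count (l[j]) < f (l[j]) then l[j] else '*') := by
  induction l generalizing f j with
  | nil => simp at h
  | cons a t ih =>
      cases j with
      | zero => simp only [maskGo]; split <;> simp_all
      | succ j =>
          have hj : j < t.length := by simpa using h
          simp only [maskGo]
          split
          · rename_i hpos
            have := ih (fun c => if c = a then f c - 1 else f c) j hj
            simp only [List.getElem?_cons_succ, this, List.getElem_cons_succ,
              List.take_succ_cons, List.count_cons]
            by_cases hc : t[j] = a
            · subst hc; simp only [if_pos rfl]
              by_cases hlt : (t.take j).count t[j] < f t[j] - 1 <;>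
                [skip; skip] <;> simp [hlt] <;> omega
            · have hc' : ¬ a = t[j] := fun h => hc h.symm
              simp [hc, hc', beq_iff_eq]
          · rename_i hpos
            have := ih f j hj
            simp only [List.getElem?_cons_succ, this, List.getElem_cons_succ,
              List.take_succ_cons, List.count_cons]
            by_cases hc : t[j] = a
            · subst hc; have : f t[j] = 0 := by omega
              simp [this]
            · have hc' : ¬ a = t[j] := fun h => hc h.symm
              simp [hc, hc', beq_iff_eq]

-- ---- A side ----
theorem foldl_append_singleton (l acc : List Char) :
    l.foldl (fun acc i => acc ++ [i]) acc = acc ++ l := by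
  induction l generalizing acc with
  | nil => simp
  | cons a t ih => simp [List.foldl_cons, ih]

theorem yoshirinA_loop_eq (l : List Char) (soz q : List Char) :
    yoshirinA_loop l soz q = q ++ maskGo l (fun c => soz.count c) := by
  induction l generalizing soz q with
  | nil => simp [yoshirinA_loop, maskGo]
  | cons i rest ih =>
      simp only [yoshirinA_loop, maskGo]
      by_cases hmem : i ∈ soz
      · rw [if_pos hmem, PySem.List.remove?_eq_some_erase soz i hmem, Option.getD_some]
        have hpos : 0 < soz.count i := List.count_pos_iff.mpr hmem
        rw [if_pos hpos, ih]
        have hf : (fun c => (soz.erase i).count c)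
            = (fun c => if c = i then soz.count c - 1 else soz.count c) := by
          funext c
          by_cases hc : c = i
          · subst hc; simp [List.count_erase_self]
          · simp [hc, List.count_erase_of_ne hc]
        rw [hf]; simp
      · rw [if_neg hmem]
        have hpos : ¬ 0 < soz.count i := by
          simp [List.count_pos_iff, hmem]
        rw [if_neg hpos, ih]; simp

theorem foldl_star (l : List Int) (acc : List Char) :
    l.foldl (fun q _ => q ++ ['*']) acc = acc ++ List.replicate l.length '*' := by
  induction l generalizing acc with
  | nil => simp
  | cons a t ih =>
      simp [List.foldl_cons, ih, List.replicate_succ]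

-- ---- B side ----
-- positions of c in l, indices starting at s
def posFromN (c : Char) : List Char → Nat → List Nat
  | [], _ => []
  | a :: t, s => if a = c then s :: posFromN c t (s + 1) else posFromN c t (s + 1)

theorem posFromN_mem (c : Char) (l : List Char) (s x : Nat) (hx : x ∈ posFromN c l s) :
    s ≤ x ∧ x - s < l.length ∧ l[x - s]? = some c := by
  induction l generalizing s with
  | nil => simp [posFromN] at hx
  | cons a t ih =>
      simp only [posFromN] at hx
      by_cases ha : a = c
      · rw [if_pos ha] at hx
        rcases List.mem_cons.mp hx with h | h
        · subst h; simp [ha]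
        · rcases ih (s + 1) h with ⟨h1, h2, h3⟩
          refine ⟨by omega, by simp; omega, ?_⟩
          have hxs : x - s = (x - (s + 1)) + 1 := by omega
          rw [hxs]; simpa using h3
      · rw [if_neg ha] at hx
        rcases ih (s + 1) hx with ⟨h1, h2, h3⟩
        refine ⟨by omega, by simp; omega, ?_⟩
        have hxs : x - s = (x - (s + 1)) + 1 := by omega
        rw [hxs]; simpa using h3

theorem posFromN_take_mem (c : Char) (l : List Char) (s m j : Nat)
    (hj : j < l.length) (hc : l[j] = c) :
    (s + j) ∈ (posFromN c l s).take m ↔ (l.take j).count c < m := by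
  induction l generalizing s m j with
  | nil => simp at hj
  | cons a t ih =>
      cases j with
      | zero =>
          have ha : a = c := by simpa using hc
          simp only [posFromN, if_pos ha]
          cases m with
          | zero => simp
          | succ m => simp
      | succ j =>
          have hj' : j < t.length := by simpa using hj
          have hc' : t[j] = c := by simpa using hc
          by_cases ha : a = c
          · simp only [posFromN, if_pos ha]
            cases m with
            | zero => simp
            | succ m =>
                simp only [List.take_succ_cons, List.mem_cons]
                have hne : s + (j + 1) ≠ s := by omega
                have heq : s + (j + 1) = (s + 1) + j := by omega
                rw [heq]
                simp only [hne, false_or, ih (s + 1) m j hj' hc',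
                  List.count_cons, ha]
                simp [beq_iff_eq]
                omega
          · simp only [posFromN, if_neg ha]
            have heq : s + (j + 1) = (s + 1) + j := by omega
            rw [heq, ih (s + 1) m j hj' hc']
            have : ¬ (a = c) := ha
            simp [List.take_succ_cons, List.count_cons, beq_iff_eq, this]

-- length is preserved by the write loops
theorem length_foldl_pySetD (is : List Int) (r : List Char) (c : Char) :
    (is.foldl (fun r idx => PySem.List.pySetD r idx c) r).length = r.length := by
  induction is generalizing r with
  | nil => rfl
  | cons i t ih => simp [List.foldl_cons, ih, PySem.List.length_pySetD]

theorem getElem?_foldl_pySetD (qs : List Nat) (r : List Char) (c : Char) (j : Nat)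
    (hq : ∀ x ∈ qs, x < r.length) :
    ((qs.map Int.ofNat).foldl (fun r idx => PySem.List.pySetD r idx c) r)[j]?
      = if j ∈ qs then some c else r[j]? := by
  induction qs generalizing r with
  | nil => simp
  | cons q t ih =>
      have hqr : q < r.length := hq q (by simp)
      simp only [List.map_cons, List.foldl_cons, Int.ofNat_eq_natCast,
        PySem.List.pySetD_natCast]
      rw [ih (r.set q c) (by intro x hx; simpa using hq x (by simp [hx]))]
      by_cases hjt : j ∈ t
      · simp [hjt]
      · simp only [hjt, if_false, List.mem_cons, false_or]
        by_cases hjq : j = q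
        · subst hjq; simp [List.getElem?_set, hqr]
        · have : ¬ (q = j) := fun h => hjq h.symm
          simp [List.getElem?_set, this, hjq]

theorem getElem?_foldl_write (bl : List Char) (cnt : PySem.Dict Char Int)
    (L : List (Char × List Int)) (r : List Char) (j : Nat)
    (hr : r.length = bl.length)
    (hL : ∀ p ∈ L, ∃ qs : List Nat,
        PySem.List.slice p.2 none (some (cnt.getD p.1 0)) = qs.map Int.ofNat
        ∧ ∀ x ∈ qs, x < bl.length ∧ bl[x]? = some p.1) :
    (L.foldl (fun r p =>
        (PySem.List.slice p.2 none (some (cnt.getD p.1 0))).foldl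
          (fun r idx => PySem.List.pySetD r idx p.1) r) r)[j]?
      = if (∃ p ∈ L, ((j : Int)) ∈ PySem.List.slice p.2 none (some (cnt.getD p.1 0)))
          then bl[j]? else r[j]? := by
  induction L generalizing r with
  | nil => simp
  | cons p t ih =>
      rcases hL p (by simp) with ⟨qs, hslice, hqs⟩
      simp only [List.foldl_cons]
      set r' := (PySem.List.slice p.2 none (some (cnt.getD p.1 0))).foldl
          (fun r idx => PySem.List.pySetD r idx p.1) r with hr'
      have hr'len : r'.length = bl.length := by
        rw [hr', length_foldl_pySetD, hr]
      rw [ih r' hr'len (fun q hq' => hL q (List.mem_cons_of_mem _ hq'))]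
      have hr'j : r'[j]? = if j ∈ qs then some p.1 else r[j]? := by
        rw [hr', hslice]
        exact getElem?_foldl_pySetD qs r p.1 j
          (fun x hx => by rw [hr]; exact (hqs x hx).1)
      by_cases hrest : ∃ q ∈ t, ((j : Int)) ∈ PySem.List.slice q.2 none (some (cnt.getD q.1 0))
      · have hall : ∃ q ∈ p :: t, ((j : Int)) ∈ PySem.List.slice q.2 none (some (cnt.getD q.1 0)) := by
          rcases hrest with ⟨q, hqt, hqm⟩
          exact ⟨q, List.mem_cons_of_mem _ hqt, hqm⟩
        rw [if_pos hrest, if_pos hall]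
      · rw [if_neg hrest, hr'j]
        by_cases hjq : j ∈ qs
        · have hbl2 : bl[j]? = some p.1 := (hqs j hjq).2
          have hmem : ((j : Int)) ∈ PySem.List.slice p.2 none (some (cnt.getD p.1 0)) := by
            rw [hslice]
            exact List.mem_map_of_mem hjq
          rw [if_pos hjq, if_pos ⟨p, List.mem_cons_self .., hmem⟩, hbl2]
        · have hnone : ¬ ∃ q ∈ p :: t, ((j : Int)) ∈ PySem.List.slice q.2 none (some (cnt.getD q.1 0)) := by
            rintro ⟨q, hq, hm⟩
            rcases List.mem_cons.mp hq with h | h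
            · subst h
              rw [hslice] at hm
              rcases List.mem_map.mp hm with ⟨x, hx, hxe⟩
              have hxj : x = j := by rw [Int.ofNat_eq_natCast] at hxe; exact_mod_cast hxe
              exact hjq (by rwa [hxj] at hx)
            · exact hrest ⟨q, h, hm⟩
          rw [if_neg hjq, if_neg hnone]

-- the positions dict computed by B's first loop
theorem pos_dict_getD (l : List Char) (s : Nat) (d : PySem.Dict Char (List Int)) (c : Char) :
    ((PySem.List.enumerate l (s : Int)).foldl
        (fun d p => d.modify p.2 [] (fun v => v ++ [p.1])) d).getD c []
      = d.getD c [] ++ (posFromN c l s).map Int.ofNat := by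
  induction l generalizing s d with
  | nil => simp [PySem.List.enumerate_nil, posFromN]
  | cons a t ih =>
      have hcast : ((s : Int) + 1) = ((s + 1 : Nat) : Int) := by push_cast; ring
      simp only [PySem.List.enumerate_cons, List.foldl_cons, posFromN]
      rw [hcast, ih, PySem.Dict.getD_modify]
      by_cases h : a = c
      · subst h; simp
      · have h' : ¬ c = a := fun e => h e.symm
        simp [h, h']

-- ===== main theorem =====
theorem yoshirin_spec : Claim_equal_yoshirin := by
  intro b_soz k_soz _
  unfold Spec_yoshirin
  cases k_soz with
  | none =>
      simp only [yoshirin, yoshirin_alt]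
      rw [foldl_star]
      simp [PySem.List.length_pyRange_one, PySem.List.len_eq]
  | some ks =>
      simp only [yoshirin, yoshirin_alt]
      rw [foldl_append_singleton, List.nil_append, yoshirinA_loop_eq, List.nil_append]
      set bl := b_soz.toList with hbl
      set cntd := ks.toList.foldl (fun d c => d.insert c (d.getD c 0 + 1))
        (PySem.Dict.empty : PySem.Dict Char Int) with hcnt
      set posd := (PySem.List.enumerate bl 0).foldl
        (fun d p => d.modify p.2 [] (fun v => v ++ [p.1]))
        (PySem.Dict.empty : PySem.Dict Char (List Int)) with hpos
      have hcntD : ∀ c, cntd.getD c 0 = (ks.toList.count c : Int) := by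
        intro c
        rw [hcnt, PySem.Dict.getD_foldl_insert_add_one]
        simp [PySem.Dict.getD_empty]
      have hposD : ∀ c, posd.getD c [] = (posFromN c bl 0).map Int.ofNat := by
        intro c
        have := pos_dict_getD bl 0 PySem.Dict.empty c
        rw [hpos]
        simpa [PySem.Dict.getD_empty] using this
      have hnodup : posd.keys.Nodup := by
        rw [hpos]
        exact PySem.Dict.nodup_keys_foldl_modify_key (β := Int × Char)
          (PySem.List.enumerate bl) (fun p => p.2) [] (fun d p v => v ++ [p.1])
          PySem.Dict.empty PySem.Dict.nodup_keys_empty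
      -- every position's character has its entry in posd.items
      have hitems : ∀ j (hj : j < bl.length), (bl[j], posd.getD bl[j] []) ∈ posd.items := by
        intro j hj
        have hjmem : j ∈ posFromN bl[j] bl 0 := by
          have h := (posFromN_take_mem bl[j] bl 0 ((bl.take j).count bl[j] + 1) j hj rfl).mpr
            (by omega)
          have := List.mem_of_mem_take h
          simpa using this
        have hne : posd.getD bl[j] [] ≠ [] := by
          rw [hposD]
          simp only [ne_eq, List.map_eq_nil_iff]
          intro h; rw [h] at hjmem; simp at hjmem
        cases hget : posd.get? bl[j] with
        | none =>
            exact absurd (by rw [PySem.Dict.getD_eq_get?_getD, hget]; rfl) hne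
        | some v =>
            have : posd.getD bl[j] [] = v := by rw [PySem.Dict.getD_eq_get?_getD, hget]; rfl
            rw [this]
            exact (PySem.Dict.get?_eq_some_iff_mem_items _ _ _ hnodup).mp hget
      have hL : ∀ p ∈ posd.items, ∃ qs : List Nat,
          PySem.List.slice p.2 none (some (cntd.getD p.1 0)) = qs.map Int.ofNat
          ∧ ∀ x ∈ qs, x < bl.length ∧ bl[x]? = some p.1 := by
        intro p hp
        have hget : posd.get? p.1 = some p.2 :=
          (PySem.Dict.get?_eq_some_iff_mem_items _ _ _ hnodup).mpr hp
        have hgetD : posd.getD p.1 [] = p.2 := by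
          rw [PySem.Dict.getD_eq_get?_getD, hget]; rfl
        have hp2 : p.2 = (posFromN p.1 bl 0).map Int.ofNat := by
          rw [← hgetD, hposD]
        refine ⟨(posFromN p.1 bl 0).take (ks.toList.count p.1), ?_, ?_⟩
        · rw [hp2, hcntD, PySem.List.slice_to _ (Int.natCast_nonneg _), Int.toNat_natCast,
            List.map_take]
        · intro x hx
          have hx' := List.mem_of_mem_take hx
          have := posFromN_mem p.1 bl 0 x hx'
          simpa using this
      refine congrArg String.mk ?_
      apply List.ext_getElem?
      intro j
      rw [getElem?_foldl_write bl cntd posd.items (List.replicate bl.length '*') j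
        (by simp) hL]
      by_cases hj : j < bl.length
      · rw [maskGo_getElem? bl _ j hj]
        have hcond : (∃ p ∈ posd.items,
              ((j : Int)) ∈ PySem.List.slice p.2 none (some (cntd.getD p.1 0)))
            ↔ (bl.take j).count bl[j] < ks.toList.count bl[j] := by
          constructor
          · rintro ⟨p, hp, hm⟩
            have hget : posd.get? p.1 = some p.2 :=
              (PySem.Dict.get?_eq_some_iff_mem_items _ _ _ hnodup).mpr hp
            have hgetD : posd.getD p.1 [] = p.2 := by
              rw [PySem.Dict.getD_eq_get?_getD, hget]; rfl
            have hp2 : p.2 = (posFromN p.1 bl 0).map Int.ofNat := by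
              rw [← hgetD, hposD]
            rw [hp2, hcntD, PySem.List.slice_to _ (Int.natCast_nonneg _), Int.toNat_natCast,
              ← List.map_take] at hm
            rcases List.mem_map.mp hm with ⟨x, hx, hxe⟩
            have hxj : x = j := by rw [Int.ofNat_eq_natCast] at hxe; exact_mod_cast hxe
            subst hxj
            have hx' := List.mem_of_mem_take hx
            have hmem := posFromN_mem p.1 bl 0 x hx'
            simp only [Nat.sub_zero] at hmem
            have hxc : bl[x] = p.1 := by
              have := hmem.2.2
              rw [List.getElem?_eq_getElem hj] at this
              exact Option.some.inj this
            rw [hxc]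
            exact (posFromN_take_mem p.1 bl 0 (ks.toList.count p.1) x hj hxc).mp
              (by simpa using hx)
          · intro hlt
            refine ⟨(bl[j], posd.getD bl[j] []), hitems j hj, ?_⟩
            dsimp only
            rw [hposD, hcntD, PySem.List.slice_to _ (Int.natCast_nonneg _), Int.toNat_natCast,
              ← List.map_take]
            refine List.mem_map.mpr ⟨j, ?_, rfl⟩
            have := (posFromN_take_mem bl[j] bl 0 (ks.toList.count bl[j]) j hj rfl).mpr hlt
            simpa using this
        by_cases hlt : (bl.take j).count bl[j] < ks.toList.count bl[j]
        · rw [if_pos hlt, if_pos (hcond.mpr hlt), List.getElem?_eq_getElem hj]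
        · rw [if_neg hlt, if_neg (fun h => hlt (hcond.mp h))]
          simp [hj]
      · have h1 : (maskGo bl (fun c => ks.toList.count c))[j]? = none := by
          apply List.getElem?_eq_none
          rw [maskGo_length]; omega
        rw [h1]
        by_cases hc : ∃ p ∈ posd.items,
            ((j : Int)) ∈ PySem.List.slice p.2 none (some (cntd.getD p.1 0))
        · rcases hc with ⟨p, hp, hm⟩
          rcases hL p hp with ⟨qs, hs, hq⟩
          rw [hs] at hm
          rcases List.mem_map.mp hm with ⟨x, hx, hxe⟩
          have hxj : x = j := by rw [Int.ofNat_eq_natCast] at hxe; exact_mod_cast hxe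
          subst hxj
          exact absurd (hq x hx).1 hj
        · rw [if_neg hc]
          symm
          apply List.getElem?_eq_none
          simp; omega
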